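-- pv_equiv track=rewrite | github.com/p1x31/ctci-python | edx/cf/886/g (copy).py | solve
-- ===== SOURCE A (Python) =====
-- def solve(n, points):
--     d_plus, d_minus, red, stupac = {}, {}, {}, {}
--     r=0
--
--     for i in points:
--         x, y = i
--         a, b, c, d = red.get(x, 0), stupac.get(y, 0), d_plus.get(x+y, 0), d_minus.get(x-y, 0)
--         r+=(a+b+c+d)*2; red[x], stupac[y], d_plus[x+y], d_minus[x-y] = a+1, b+1, c+1, d+1;
--
--     return r
-- ===== SOURCE B (Python) =====
-- def solve(n, points):
--     # Pass 1: build four frequency tables over x, y, x+y and x-y.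
--     rows, cols, d_plus, d_minus = {}, {}, {}, {}
--     for x, y in points:
--         rows[x] = rows.get(x, 0) + 1
--         cols[y] = cols.get(y, 0) + 1
--         d_plus[x + y] = d_plus.get(x + y, 0) + 1
--         d_minus[x - y] = d_minus.get(x - y, 0) + 1
--     # Pass 2: each group of k equal keys contributes k*(k-1) ordered pairs.
--     total = 0
--     for table in (rows, cols, d_plus, d_minus):
--         for v in table.values():
--             total += v * (v - 1)
--     return total
-- ===== Notes on version B (the rewrite author's own statement) =====
-- stated objective: simpler
-- what changed: Replaces the fused incremental loop (adding 2*previous-count per point while updating four dicts) by two separated passes: first build four complete frequency tables, then sum v*(v-1) over each table's counts, using the identity sum of 2*(0..k-1) = k*(k-1).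
import Mathlib
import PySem

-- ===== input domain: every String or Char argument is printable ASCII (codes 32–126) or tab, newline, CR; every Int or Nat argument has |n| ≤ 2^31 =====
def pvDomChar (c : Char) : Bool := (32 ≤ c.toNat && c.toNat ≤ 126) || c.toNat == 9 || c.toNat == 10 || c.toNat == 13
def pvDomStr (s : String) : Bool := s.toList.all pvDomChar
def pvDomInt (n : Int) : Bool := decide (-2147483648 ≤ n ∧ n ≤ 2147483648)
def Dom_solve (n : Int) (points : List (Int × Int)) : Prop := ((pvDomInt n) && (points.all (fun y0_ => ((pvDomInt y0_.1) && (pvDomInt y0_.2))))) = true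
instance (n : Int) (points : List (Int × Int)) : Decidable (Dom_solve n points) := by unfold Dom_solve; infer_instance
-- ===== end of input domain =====

-- B replaces A's fused incremental loop by two separated passes (build four frequency
-- tables, then sum v*(v-1) over each table's counts); objective: simpler.

-- ===== PORT A =====
-- A: one loop; for each point add 2*(current counts of its row/col/diagonals), then bump the four dicts.
def solve (n : Int) (points : List (Int × Int)) : Int :=
  (points.foldl
    (fun st i =>
      match st with
      | (d_plus, d_minus, red, stupac, r) =>
        let x := i.1
        let y := i.2
        let a := red.getD x 0
        let b := stupac.getD y 0
        let c := d_plus.getD (x + y) 0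
        let d := d_minus.getD (x - y) 0
        (d_plus.insert (x + y) (c + 1), d_minus.insert (x - y) (d + 1),
         red.insert x (a + 1), stupac.insert y (b + 1),
         r + (a + b + c + d) * 2))
    (PySem.Dict.empty, PySem.Dict.empty, PySem.Dict.empty, PySem.Dict.empty, (0 : Int))).2.2.2.2

-- ===== PORT B =====
-- B: pass 1 builds the four complete frequency tables; pass 2 sums v*(v-1) over each table.
def solve_alt (n : Int) (points : List (Int × Int)) : Int :=
  let tables :=
    points.foldl
      (fun st p =>
        match st with
        | (rows, cols, d_plus, d_minus) =>
          (rows.insert p.1 (rows.getD p.1 0 + 1),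
           cols.insert p.2 (cols.getD p.2 0 + 1),
           d_plus.insert (p.1 + p.2) (d_plus.getD (p.1 + p.2) 0 + 1),
           d_minus.insert (p.1 - p.2) (d_minus.getD (p.1 - p.2) 0 + 1)))
      ((PySem.Dict.empty : PySem.Dict Int Int), (PySem.Dict.empty : PySem.Dict Int Int),
       (PySem.Dict.empty : PySem.Dict Int Int), (PySem.Dict.empty : PySem.Dict Int Int))
  [tables.1, tables.2.1, tables.2.2.1, tables.2.2.2].foldl
    (fun total table => table.values.foldl (fun total v => total + v * (v - 1)) total) 0

-- ===== PRECONDITION & SPEC =====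
def Spec_solve (n : Int) (points : List (Int × Int)) (out : Int) : Prop := out = solve_alt n points
instance (n : Int) (points : List (Int × Int)) (out : Int) : Decidable (Spec_solve n points out) := by unfold Spec_solve; infer_instance

-- ===== CLAIM (what is proved, stated in full; the proofs are below) =====
def Claim_equal_solve : Prop := ∀ (n : Int) (points : List (Int × Int)), Dom_solve n points → Spec_solve n points (solve n points)

-- ===== LEMMAS AND PROOFS =====

-- per-key incremental pair fold (the shape of A's loop restricted to one table)
def pf (l : List Int) (st : PySem.Dict Int Int × Int) : PySem.Dict Int Int × Int :=
  l.foldl (fun p x => (p.1.insert x (p.1.getD x 0 + 1), p.2 + 2 * p.1.getD x 0)) st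

-- B's per-table quantity: sum of v*(v-1) over the frequency table of l
def pairSum (l : List Int) : Int :=
  ((PySem.Dict.counter l).values.map (fun v => v * (v - 1))).sum

theorem pf_shift (l : List Int) (d : PySem.Dict Int Int) (s : Int) :
    pf l (d, s) = ((pf l (d, 0)).1, s + (pf l (d, 0)).2) := by
  induction l generalizing d s with
  | nil => simp [pf]
  | cons x xs ih =>
    simp only [pf, List.foldl_cons] at *
    rw [ih, ih (d.insert x (d.getD x 0 + 1)) (0 + 2 * d.getD x 0)]
    simp only [Prod.mk.injEq]
    refine ⟨by trivial, by ring⟩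

theorem counter_snoc (l : List Int) (x : Int) :
    PySem.Dict.counter (l ++ [x])
      = (PySem.Dict.counter l).insert x ((PySem.Dict.counter l).getD x 0 + 1) := by
  rw [← PySem.Dict.foldl_insert_getD_add_one_eq_counter, ← PySem.Dict.foldl_insert_getD_add_one_eq_counter,
      List.foldl_append]
  simp

theorem sum_update (s : List Int) (hs : s.Nodup) (x : Int) (hx : x ∈ s)
    (F G : Int → Int) (hFG : ∀ k ∈ s, k ≠ x → G k = F k) :
    (s.map G).sum = (s.map F).sum + (G x - F x) := by
  induction s with
  | nil => cases hx
  | cons a t ih =>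
    rcases List.mem_cons.mp hx with rfl | hxt
    · have : ∀ k ∈ t, G k = F k := by
        intro k hk
        exact hFG k (List.mem_cons_of_mem _ hk) (fun h => (List.nodup_cons.mp hs).1 (h ▸ hk))
      simp only [List.map_cons, List.sum_cons]
      rw [List.map_congr_left this]
      ring
    · have ha : a ≠ x := fun h => (List.nodup_cons.mp hs).1 (h ▸ hxt)
      simp only [List.map_cons, List.sum_cons]
      rw [hFG a (List.mem_cons_self) ha,
          ih (List.nodup_cons.mp hs).2 hxt (fun k hk => hFG k (List.mem_cons_of_mem _ hk))]
      ring

theorem values_counter (l : List Int) :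
    (PySem.Dict.counter l).values = (PySem.Set.ofList l).map (fun k => (l.count k : Int)) := by
  show ((PySem.Dict.counter l).items.map (·.2)) = _
  rw [PySem.Dict.items_counter, List.map_map]
  rfl

theorem pairSum_snoc (l : List Int) (x : Int) :
    pairSum (l ++ [x]) = pairSum l + 2 * (l.count x : Int) := by
  have hcnt : ∀ k : Int, (l ++ [x]).count k = l.count k + if k = x then 1 else 0 := by
    intro k
    by_cases h : k = x
    · subst h; simp [List.count_append]
    · simp [List.count_append, h, List.count_singleton]
      omega
  unfold pairSum
  rw [values_counter, values_counter, List.map_map, List.map_map]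
  simp only [Function.comp_def]
  by_cases hx : x ∈ l
  · rw [PySem.Set.ofList_append_singleton,
        PySem.Set.add_of_mem (by exact (PySem.Set.mem_ofList l x).mpr hx)]
    rw [sum_update (PySem.Set.ofList l) (PySem.Set.nodup_ofList l) x ((PySem.Set.mem_ofList l x).mpr hx)
        (fun k => ((l.count k : Int) * ((l.count k : Int) - 1)))
        (fun k => (((l ++ [x]).count k : Int) * (((l ++ [x]).count k : Int) - 1)))
        (by intro k _ hk; simp [hcnt k, hk])]
    rw [hcnt x]
    simp
    ring
  · rw [PySem.Set.ofList_append_singleton,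
        PySem.Set.add_of_not_mem (fun h => hx ((PySem.Set.mem_ofList l x).mp h))]
    rw [List.map_append, List.sum_append]
    have h1 : ∀ k ∈ PySem.Set.ofList l,
        (((l ++ [x]).count k : Int) * (((l ++ [x]).count k : Int) - 1))
          = ((l.count k : Int) * ((l.count k : Int) - 1)) := by
      intro k hk
      have hkx : k ≠ x := fun h => hx (h ▸ (PySem.Set.mem_ofList l k).mp hk)
      simp [hcnt k, hkx]
    rw [List.map_congr_left h1]
    have hx0 : l.count x = 0 := List.count_eq_zero.mpr hx
    simp [hx0]

theorem pf_counter (l : List Int) :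
    pf l (PySem.Dict.empty, 0) = (PySem.Dict.counter l, pairSum l) := by
  induction l using List.reverseRecOn with
  | nil => rfl
  | append_singleton xs x ih =>
    unfold pf at *
    rw [List.foldl_append, ih]
    simp only [List.foldl]
    rw [counter_snoc, pairSum_snoc]
    have : (PySem.Dict.counter xs).getD x 0 = (xs.count x : Int) := PySem.Dict.getD_counter xs x
    rw [this]

theorem pf_cons (x : Int) (xs : List Int) (d : PySem.Dict Int Int) :
    pf (x :: xs) (d, 0)
      = ((pf xs (d.insert x (d.getD x 0 + 1), 0)).1,
         2 * d.getD x 0 + (pf xs (d.insert x (d.getD x 0 + 1), 0)).2) := by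
  show pf xs (d.insert x (d.getD x 0 + 1), 0 + 2 * d.getD x 0) = _
  rw [pf_shift]
  simp only [Prod.mk.injEq]
  refine ⟨by trivial, by ring⟩

theorem solve_decomp (points : List (Int × Int)) (d1 d2 d3 d4 : PySem.Dict Int Int) (r : Int) :
    points.foldl
      (fun st i =>
        match st with
        | (d_plus, d_minus, red, stupac, r) =>
          let x := i.1
          let y := i.2
          let a := red.getD x 0
          let b := stupac.getD y 0
          let c := d_plus.getD (x + y) 0
          let d := d_minus.getD (x - y) 0
          (d_plus.insert (x + y) (c + 1), d_minus.insert (x - y) (d + 1),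
           red.insert x (a + 1), stupac.insert y (b + 1),
           r + (a + b + c + d) * 2))
      (d1, d2, d3, d4, r)
    = ((pf (points.map (fun p => p.1 + p.2)) (d1, 0)).1,
       (pf (points.map (fun p => p.1 - p.2)) (d2, 0)).1,
       (pf (points.map (fun p => p.1)) (d3, 0)).1,
       (pf (points.map (fun p => p.2)) (d4, 0)).1,
       r + (pf (points.map (fun p => p.1 + p.2)) (d1, 0)).2
         + (pf (points.map (fun p => p.1 - p.2)) (d2, 0)).2
         + (pf (points.map (fun p => p.1)) (d3, 0)).2
         + (pf (points.map (fun p => p.2)) (d4, 0)).2) := by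
  induction points generalizing d1 d2 d3 d4 r with
  | nil => simp [pf]
  | cons p ps ih =>
    simp only [List.foldl_cons, List.map_cons]
    rw [ih, pf_cons, pf_cons, pf_cons, pf_cons]
    simp only [Prod.mk.injEq]
    refine ⟨by trivial, by trivial, by trivial, by trivial, by ring⟩

-- B-side pass-1 fold restricted to one table
def bf (key : (Int × Int) → Int) (pts : List (Int × Int)) (d : PySem.Dict Int Int) : PySem.Dict Int Int :=
  pts.foldl (fun d p => d.insert (key p) (d.getD (key p) 0 + 1)) d

theorem bf_counter (key : (Int × Int) → Int) (pts : List (Int × Int)) :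
    bf key pts PySem.Dict.empty = PySem.Dict.counter (pts.map key) := by
  unfold bf
  rw [← PySem.Dict.foldl_insert_getD_add_one_eq_counter (pts.map key)]
  exact (List.foldl_map (f := key) (g := fun (d : PySem.Dict Int Int) (k : Int) => d.insert k (d.getD k 0 + 1))).symm

theorem alt_decomp (points : List (Int × Int))
    (t : PySem.Dict Int Int × PySem.Dict Int Int × PySem.Dict Int Int × PySem.Dict Int Int) :
    points.foldl
      (fun st p =>
        match st with
        | (rows, cols, d_plus, d_minus) =>
          (rows.insert p.1 (rows.getD p.1 0 + 1),
           cols.insert p.2 (cols.getD p.2 0 + 1),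
           d_plus.insert (p.1 + p.2) (d_plus.getD (p.1 + p.2) 0 + 1),
           d_minus.insert (p.1 - p.2) (d_minus.getD (p.1 - p.2) 0 + 1)))
      t
    = (bf (fun p => p.1) points t.1, bf (fun p => p.2) points t.2.1,
       bf (fun p => p.1 + p.2) points t.2.2.1, bf (fun p => p.1 - p.2) points t.2.2.2) := by
  obtain ⟨a, b, c, d⟩ := t
  induction points generalizing a b c d with
  | nil => rfl
  | cons p ps ih =>
    simp only [List.foldl_cons, bf]
    exact ih _ _ _ _

theorem alt_tables (points : List (Int × Int)) :
    points.foldl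
      (fun st p =>
        match st with
        | (rows, cols, d_plus, d_minus) =>
          (rows.insert p.1 (rows.getD p.1 0 + 1),
           cols.insert p.2 (cols.getD p.2 0 + 1),
           d_plus.insert (p.1 + p.2) (d_plus.getD (p.1 + p.2) 0 + 1),
           d_minus.insert (p.1 - p.2) (d_minus.getD (p.1 - p.2) 0 + 1)))
      ((PySem.Dict.empty : PySem.Dict Int Int), (PySem.Dict.empty : PySem.Dict Int Int),
       (PySem.Dict.empty : PySem.Dict Int Int), (PySem.Dict.empty : PySem.Dict Int Int))
    = ((PySem.Dict.counter (points.map (fun p => p.1)) : PySem.Dict Int Int),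
       (PySem.Dict.counter (points.map (fun p => p.2)) : PySem.Dict Int Int),
       (PySem.Dict.counter (points.map (fun p => p.1 + p.2)) : PySem.Dict Int Int),
       (PySem.Dict.counter (points.map (fun p => p.1 - p.2)) : PySem.Dict Int Int)) := by
  rw [alt_decomp]
  rw [bf_counter, bf_counter, bf_counter, bf_counter]

theorem values_foldl_pairs (d : PySem.Dict Int Int) (t : Int) :
    d.values.foldl (fun total v => total + v * (v - 1)) t
      = t + (d.values.map (fun v => v * (v - 1))).sum :=
  PySem.List.foldl_add _ _ _

-- ===== VERDICT (by name: the statement is the Claim_ definition above) =====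
theorem solve_spec : Claim_equal_solve := by
  intro n points _
  show solve n points = solve_alt n points
  unfold solve solve_alt
  rw [solve_decomp, alt_tables]
  simp only [List.foldl_cons, List.foldl_nil, values_foldl_pairs, pf_counter]
  unfold pairSum
  ring
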